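-- pv_equiv track=rewrite | github.com/HomelessCanadian/rblx-obscure-scripts | 1bitVideoPlayer/bmpToLua16.py | encode_chunk
-- ===== SOURCE A (Python) =====
-- def encode_chunk(chunk):
--     hex_str = ""
--     for i in range(0, len(chunk), 8):
--         byte_bits = chunk[i:i+8]
--         while len(byte_bits) < 8:
--             byte_bits.append(0)
--         byte_val = sum(byte_bits[j] << (7-j) for j in range(8))
--         hex_str += f"{byte_val:02x}"
--     return hex_str
-- ===== SOURCE B (Python) =====
-- def encode_chunk(chunk):
--     out = []
--     acc = 0
--     cnt = 0
--     for bit in chunk: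
--         acc = acc * 2 + bit
--         cnt += 1
--         if cnt == 8:
--             out.append(f"{acc:02x}")
--             acc = 0
--             cnt = 0
--     if cnt > 0:
--         out.append(f"{acc << (8 - cnt):02x}")
--     return "".join(out)
-- ===== Notes on version B (the rewrite author's own statement) =====
-- stated objective: alternative
-- what changed: Replaces the index-range loop that slices out 8-bit sublists, pads them with a while loop and sums explicit shifts with a single pass over the bits maintaining a Horner accumulator (acc = acc*2 + bit) and a counter, emitting a hex byte each time the counter reaches 8 and shifting the trailing partial byte once at the end; output collected in a list and joined instead of string concatenation.
import Mathlib
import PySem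

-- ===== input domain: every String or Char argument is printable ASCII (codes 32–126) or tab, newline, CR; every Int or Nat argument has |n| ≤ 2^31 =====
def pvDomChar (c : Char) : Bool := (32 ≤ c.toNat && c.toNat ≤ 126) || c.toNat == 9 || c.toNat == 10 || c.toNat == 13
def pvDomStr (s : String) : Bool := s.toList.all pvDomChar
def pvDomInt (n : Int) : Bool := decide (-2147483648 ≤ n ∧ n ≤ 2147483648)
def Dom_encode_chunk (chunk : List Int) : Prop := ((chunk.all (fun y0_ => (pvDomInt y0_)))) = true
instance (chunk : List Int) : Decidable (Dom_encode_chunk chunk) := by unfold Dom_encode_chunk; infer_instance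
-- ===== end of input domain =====

-- B replaces A's slice-pad-and-sum-of-shifts per 8-index block with one pass over the bits
-- keeping a Horner accumulator and a counter (alternative decomposition: no slicing, padding or repeated string concatenation).

-- shared f-string helper: f"{n:02x}" (lowercase hex, width 2, zero fill after the sign), exact for every Int
def pvHexDigit (n : Nat) : Char := if n < 10 then Char.ofNat (48 + n) else Char.ofNat (87 + n)

def pvHexAux (n : Nat) (acc : List Char) : List Char :=
  if n = 0 then acc else pvHexAux (n / 16) (pvHexDigit (n % 16) :: acc)
decreasing_by exact Nat.div_lt_self (by omega) (by omega)

def pvFmt02x (n : Int) : List Char :=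
  let digs := if n.natAbs = 0 then ['0'] else pvHexAux n.natAbs []
  let sign : List Char := if n < 0 then ['-'] else []
  if 2 ≤ sign.length + digs.length then sign ++ digs
  else sign ++ List.replicate (2 - (sign.length + digs.length)) '0' ++ digs

-- ===== PORT A =====
-- while len(byte_bits) < 8: byte_bits.append(0)
def pvPadTo8 (bb : List Int) : List Int :=
  if bb.length < 8 then pvPadTo8 (bb ++ [0]) else bb
termination_by 8 - bb.length
decreasing_by simp; omega

-- body of A's 'for i in range(0, len(chunk), 8)'
def pvABody (chunk : List Int) (hs : List Char) (i : Int) : List Char :=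
  hs ++ pvFmt02x
    (((PySem.List.pyRange 0 8 1).map
      (fun j => PySem.List.pyGetD (pvPadTo8 (PySem.List.slice chunk (some i) (some (i + 8)))) j 0
        <<< ((7 : Int) - j).toNat)).sum)

def encode_chunk (chunk : List Int) : String :=
  String.mk ((PySem.List.pyRange 0 (chunk.length : Int) 8).foldl (pvABody chunk) [])

-- ===== PORT B =====
-- Source B's loop body: state (out, acc, cnt)
def pvStepB (s : List (List Char) × Int × Int) (bit : Int) : List (List Char) × Int × Int :=
  if s.2.2 + 1 = 8 then (s.1 ++ [pvFmt02x (s.2.1 * 2 + bit)], 0, 0)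
  else (s.1, s.2.1 * 2 + bit, s.2.2 + 1)

def encode_chunk_alt (chunk : List Int) : String :=
  let s := chunk.foldl pvStepB ([], 0, 0)
  let out := if s.2.2 > 0 then s.1 ++ [pvFmt02x (s.2.1 <<< ((8 : Int) - s.2.2).toNat)] else s.1
  String.mk out.flatten

-- ===== PRECONDITION & SPEC =====
def Spec_encode_chunk (chunk : List Int) (out : String) : Prop := out = encode_chunk_alt chunk
instance (chunk : List Int) (out : String) : Decidable (Spec_encode_chunk chunk out) := by unfold Spec_encode_chunk; infer_instance

-- ===== CLAIM (what is proved, stated in full; the proofs are below) =====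
def Claim_equal_encode_chunk : Prop := ∀ (chunk : List Int), Dom_encode_chunk chunk → Spec_encode_chunk chunk (encode_chunk chunk)

-- ===== LEMMAS AND PROOFS =====

-- the common value both programs compute: hex bytes of the bit stream, Horner style
def pvHorner (a : Int) (l : List Int) : Int := l.foldl (fun x b => x * 2 + b) a

def pvE (l : List Int) : List Char :=
  if h : l = [] then []
  else pvFmt02x (pvHorner 0 (l.take 8 ++ List.replicate (8 - l.length) 0)) ++ pvE (l.drop 8)
termination_by l.length
decreasing_by
  simp only [List.length_drop]
  have h2 : 0 < l.length := List.length_pos_iff.mpr h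
  omega

theorem pvPadTo8_eq (bb : List Int) : pvPadTo8 bb = bb ++ List.replicate (8 - bb.length) 0 := by
  fun_induction pvPadTo8 bb with
  | case1 bb h ih =>
      rw [ih]
      have : 8 - bb.length = (8 - (bb ++ [(0 : Int)]).length) + 1 := by simp; omega
      rw [this, List.replicate_succ, List.append_assoc]
      rfl
  | case2 bb h => simp; omega

theorem pvHorner_append (a : Int) (l₁ l₂ : List Int) :
    pvHorner a (l₁ ++ l₂) = pvHorner (pvHorner a l₁) l₂ := by
  simp [pvHorner, List.foldl_append]

theorem pvHorner_replicate_zero (a : Int) (k : Nat) :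
    pvHorner a (List.replicate k 0) = a * 2 ^ k := by
  induction k generalizing a with
  | zero => simp [pvHorner]
  | succ k ih =>
      rw [List.replicate_succ]
      show pvHorner (a * 2 + 0) (List.replicate k 0) = _
      rw [ih]; ring

-- A's sum of shifts is the Horner value, for any list of length k
theorem pvSum_shift (k : Nat) (bb : List Int) (h : bb.length = k) :
    ((PySem.List.pyRange 0 (k : Int) 1).map
      (fun j => PySem.List.pyGetD bb j 0 <<< (((k : Int) - 1) - j).toNat)).sum
    = pvHorner 0 bb := by
  induction k generalizing bb with
  | zero =>
      have : bb = [] := List.eq_nil_of_length_eq_zero h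
      subst this
      simp [pvHorner]
  | succ k ih =>
      rcases bb.eq_nil_or_concat with rfl | ⟨l, b, rfl⟩
      · simp at h
      · simp only [List.concat_eq_append] at h ⊢
        have hl : l.length = k := by simpa using h
        have hcast : ((k : Int) + 1) = ((k : Int) + 1) := rfl
        rw [show ((k + 1 : Nat) : Int) = (k : Int) + 1 by push_cast; ring,
            PySem.List.pyRange_one_succ_right (by positivity)]
        rw [List.map_append, List.sum_append]
        have hlast : PySem.List.pyGetD (l ++ [b]) (k : Int) 0 = b := by
          rw [PySem.List.pyGetD_natCast]
          simp [List.getD, ← hl]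
        have hmap :
            (PySem.List.pyRange 0 (k : Int) 1).map
              (fun j => PySem.List.pyGetD (l ++ [b]) j 0 <<< ((((k : Int) + 1) - 1) - j).toNat)
            = (PySem.List.pyRange 0 (k : Int) 1).map
              (fun j => 2 * (PySem.List.pyGetD l j 0 <<< (((k : Int) - 1) - j).toNat)) := by
          apply List.map_congr_left
          intro j hj
          rw [PySem.List.mem_pyRange_one] at hj
          obtain ⟨j, rfl⟩ : ∃ m : Nat, j = (m : Int) := ⟨j.toNat, by omega⟩
          have hjk : j < k := by exact_mod_cast hj.2
          rw [PySem.List.pyGetD_natCast, PySem.List.pyGetD_natCast]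
          rw [List.getD_append l [b] 0 j (by omega)]
          rw [Int.shiftLeft_eq, Int.shiftLeft_eq]
          have h1 : (((k : Int) + 1) - 1 - (j : Int)).toNat = (k - j) := by omega
          have h2 : (((k : Int)) - 1 - (j : Int)).toNat = (k - j) - 1 := by omega
          rw [h1, h2]
          obtain ⟨m, hm1, hm2⟩ : ∃ m, k - j - 1 = m ∧ k - j = m + 1 := ⟨k - j - 1, rfl, by omega⟩
          rw [hm1, hm2]
          ring
        rw [hmap, List.sum_map_mul_left, ih l hl]
        simp only [List.map_cons, List.map_nil, List.sum_cons, List.sum_nil, add_zero]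
        rw [hlast, pvHorner_append]
        have h4 : (((k : Int) + 1) - 1 - (k : Int)).toNat = 0 := by omega
        rw [h4]
        simp [pvHorner, Int.shiftLeft_eq]
        ring

-- byte value of the padded first block (any list; padding makes it length 8)
theorem pvABody_eq (chunk : List Int) (hs : List Char) :
    pvABody chunk hs 0
    = hs ++ pvFmt02x (pvHorner 0 (chunk.take 8 ++ List.replicate (8 - chunk.length) 0)) := by
  unfold pvABody
  have hsl : PySem.List.slice chunk (some (0 : Int)) (some ((0 : Int) + 8)) = chunk.take 8 := by
    rw [show ((0 : Int) + 8) = (8 : Int) by ring]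
    rw [PySem.List.slice_toNat chunk (by omega) (by omega)]
    simp
  rw [hsl, pvPadTo8_eq]
  have hlen : ((chunk.take 8 ++ List.replicate (8 - (chunk.take 8).length) 0).length) = 8 := by
    rw [List.length_append, List.length_replicate, List.length_take]
    omega
  have := pvSum_shift 8 _ hlen
  have harg : (chunk.take 8 ++ List.replicate (8 - (chunk.take 8).length) 0)
      = chunk.take 8 ++ List.replicate (8 - chunk.length) 0 := by
    congr 1
    congr 1
    simp
    omega
  rw [show ((8 : Nat) : Int) = (8 : Int) by norm_num] at this
  have hfun : ∀ j : Int, (((8 : Int) - 1) - j).toNat = ((7 : Int) - j).toNat := by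
    intro j; omega
  simp only [hfun] at this
  rw [this, harg]

-- step-8 range peels its head
theorem pvRange8_cons (n : Nat) (h : 0 < n) :
    PySem.List.pyRange 0 (n : Int) 8
    = 0 :: (PySem.List.pyRange 0 ((n - 8 : Nat) : Int) 8).map (fun i => i + 8) := by
  rw [PySem.List.pyRange_of_pos _ _ (by norm_num), PySem.List.pyRange_of_pos _ _ (by norm_num)]
  have h1 : (if (0 : Int) < (n : Int) then (((n : Int) - 0 + 8 - 1) / 8).toNat else 0)
      = (if (0 : Int) < ((n - 8 : Nat) : Int) then ((((n - 8 : Nat) : Int) - 0 + 8 - 1) / 8).toNat else 0) + 1 := by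
    split_ifs with h2 h3 <;> push_cast <;> omega
  rw [h1, List.range_succ_eq_map]
  simp only [List.map_cons, List.map_map]
  refine congrArg₂ List.cons (by norm_num) ?_
  apply List.map_congr_left
  intro a _
  simp only [Function.comp, Nat.succ_eq_add_one]
  push_cast
  ring

-- the two slice windows coincide after dropping one block
theorem pvABody_shift (chunk : List Int) (hs : List Char) (i : Int) (hi : 0 ≤ i) :
    pvABody chunk hs (i + 8) = pvABody (chunk.drop 8) hs i := by
  unfold pvABody
  have h1 : PySem.List.slice chunk (some (i + 8)) (some (i + 8 + 8))
      = PySem.List.slice (chunk.drop 8) (some i) (some (i + 8)) := by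
    rw [PySem.List.slice_toNat chunk (by omega) (by omega),
        PySem.List.slice_toNat (chunk.drop 8) (by omega) (by omega)]
    rw [List.drop_drop]
    congr 1
    · omega
    · congr 1; omega
  rw [h1]

-- A's loop computes pvE
theorem pvAFold (n : Nat) (chunk : List Int) (hn : chunk.length = n) (out : List Char) :
    (PySem.List.pyRange 0 (chunk.length : Int) 8).foldl (pvABody chunk) out = out ++ pvE chunk := by
  induction n using Nat.strong_induction_on generalizing chunk out with
  | _ n ih =>
    rcases Nat.eq_zero_or_pos n with hz | hpos
    · have : chunk = [] := List.eq_nil_of_length_eq_zero (hn ▸ hz)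
      subst this
      simp only [List.length_nil, Nat.cast_zero]
      rw [PySem.List.pyRange_of_pos _ _ (by norm_num)]
      simp [pvE]
    · rw [hn, pvRange8_cons n (by omega), List.foldl_cons, List.foldl_map]
      rw [PySem.List.foldl_congr_mem _ _ (fun a i => pvABody (chunk.drop 8) a i) _
        (by
          intro acc x hx
          rw [PySem.List.mem_pyRange_iff_of_pos (by norm_num)] at hx
          exact pvABody_shift chunk acc x hx.1)]
      have hdl : (chunk.drop 8).length = n - 8 := by simp [hn]
      have hcast2 : ((n - 8 : Nat) : Int) = ((chunk.drop 8).length : Int) := by rw [hdl]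
      rw [hcast2, ih (n - 8) (by omega) _ hdl]
      rw [pvABody_eq]
      have hnil : chunk ≠ [] := by intro hc; rw [hc] at hn; simp at hn; omega
      conv_rhs => rw [pvE, dif_neg hnil]
      simp [List.append_assoc]

-- B's loop on fewer than 8 pending positions
theorem pvBFold_small (l : List Int) (out : List (List Char)) (acc cnt : Int)
    (h0 : 0 ≤ cnt) (h8 : cnt + l.length ≤ 8) (hlt : cnt < 8) :
    l.foldl pvStepB (out, acc, cnt)
    = if cnt + l.length = 8 then (out ++ [pvFmt02x (pvHorner acc l)], 0, 0)
      else (out, pvHorner acc l, cnt + l.length) := by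
  induction l generalizing out acc cnt with
  | nil =>
      simp only [List.foldl_nil, List.length_nil, Nat.cast_zero, add_zero]
      rw [if_neg (by omega)]
      simp [pvHorner]
  | cons b l ih =>
      rw [List.foldl_cons]
      have hstep : pvStepB (out, acc, cnt) b
          = if cnt + 1 = 8 then (out ++ [pvFmt02x (acc * 2 + b)], 0, 0)
            else (out, acc * 2 + b, cnt + 1) := rfl
      rw [hstep]
      by_cases hc : cnt + 1 = 8
      · have hl0 : l = [] := List.eq_nil_of_length_eq_zero
          (by simp only [List.length_cons] at h8; push_cast at h8; omega)
        subst hl0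
        rw [if_pos hc, List.foldl_nil,
          if_pos (by simp only [List.length_cons, List.length_nil]; push_cast; omega)]
        rfl
      · rw [if_neg hc]
        rw [ih _ _ _ (by omega)
          (by simp only [List.length_cons] at h8; push_cast at h8 ⊢; omega) (by omega)]
        have hh : pvHorner (acc * 2 + b) l = pvHorner acc (b :: l) := rfl
        rw [hh]
        by_cases hd : cnt + 1 + (l.length : Int) = 8
        · rw [if_pos hd,
            if_pos (by simp only [List.length_cons]; push_cast at hd ⊢; omega)]
        · rw [if_neg hd,
            if_neg (by simp only [List.length_cons]; push_cast at hd ⊢; omega)]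
          simp only [Prod.mk.injEq, List.length_cons, true_and]
          push_cast
          ring

-- B's whole computation produces pvE
theorem pvBFold (n : Nat) (chunk : List Int) (hn : chunk.length = n) (out : List (List Char)) :
    (let s := chunk.foldl pvStepB (out, 0, 0)
     (if s.2.2 > 0 then s.1 ++ [pvFmt02x (s.2.1 <<< ((8 : Int) - s.2.2).toNat)] else s.1).flatten)
    = out.flatten ++ pvE chunk := by
  induction n using Nat.strong_induction_on generalizing chunk out with
  | _ n ih =>
    rcases Nat.lt_or_ge n 8 with hlt | hge
    · rcases Nat.eq_zero_or_pos n with hz | hpos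
      · have : chunk = [] := List.eq_nil_of_length_eq_zero (hn ▸ hz)
        subst this
        simp [pvE]
      · rw [pvBFold_small chunk out 0 0 (by omega) (by omega) (by omega)]
        rw [if_neg (by simp [hn]; omega)]
        simp only
        rw [if_pos (by simp [hn]; omega)]
        rw [pvE]
        rw [dif_neg (by intro hc; rw [hc] at hn; simp at hn; omega)]
        have hd : chunk.drop 8 = [] := List.drop_eq_nil_of_le (by omega)
        have ht : chunk.take 8 = chunk := List.take_of_length_le (by omega)
        rw [hd, ht, pvE]
        simp only [List.flatten_append, List.flatten_cons,
          List.flatten_nil, List.append_nil]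
        congr 2
        rw [pvHorner_append, pvHorner_replicate_zero, Int.shiftLeft_eq]
        simp [hn]
    · have hnil2 : chunk ≠ [] := by intro hc0; rw [hc0] at hn; simp at hn; omega
      have hsplit := (List.take_append_drop 8 chunk).symm
      conv_lhs => rw [hsplit, List.foldl_append]
      rw [pvBFold_small (chunk.take 8) out 0 0 (by omega)
        (by simp only [List.length_take]; push_cast; omega) (by omega)]
      rw [if_pos (by simp only [List.length_take]; push_cast; omega)]
      simp only
      rw [ih (n - 8) (by omega) (chunk.drop 8) (by simp [hn]) _]
      conv_rhs => rw [pvE, dif_neg hnil2]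
      have h80 : 8 - chunk.length = 0 := by omega
      rw [h80]
      have ht8 : (chunk.take 8).length = 8 := by simp; omega
      simp only [List.replicate_zero, List.append_nil, List.flatten_append, List.flatten_cons,
        List.flatten_nil, List.append_assoc]

-- ===== VERDICT (by name: the statement is the Claim_ definition above) =====
theorem encode_chunk_spec : Claim_equal_encode_chunk := by
  intro chunk _
  unfold Spec_encode_chunk encode_chunk encode_chunk_alt
  have hA := pvAFold chunk.length chunk rfl []
  have hB := pvBFold chunk.length chunk rfl []
  simp only [List.nil_append, List.flatten_nil] at hA hB ⊢
  rw [hA, hB]
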